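-- pv_equiv track=rewrite | github.com/DnlRKorn/zincout | zinc.py | findEasyVendors
-- ===== SOURCE A (Python) =====
-- def findEasyVendors(urlist):
--     vendors = []
--     goodvendors = ["caymanchem", "chem-space", "indofinechemical", "matrixscientific", "mcule", "molport", "apexbt",
--                   "abovchem", "bldpharm", "targetmol", "trc-canada", "chemscene", "medchemexp"]
--     for row in urlist:
--         for v in goodvendors:
--             if v in row:
--                 vendors.append(row)
--                 break
--     return vendors
-- ===== SOURCE B (Python) =====
-- import re
--
-- _GOOD = ["caymanchem", "chem-space", "indofinechemical", "matrixscientific", "mcule", "molport", "apexbt",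
--          "abovchem", "bldpharm", "targetmol", "trc-canada", "chemscene", "medchemexp"]
-- _RE = re.compile("|".join(re.escape(v) for v in _GOOD))
--
-- def findEasyVendors(urlist):
--     return [row for row in urlist if _RE.search(row)]
-- ===== Notes on version B (the rewrite author's own statement) =====
-- stated objective: faster
-- what changed: B compiles the 13 vendor substrings into one regex alternation before the loop and filters rows with a single regex.search per row (a list comprehension), instead of A's nested loop testing each vendor with 'in' and appending with break.
import Mathlib
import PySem

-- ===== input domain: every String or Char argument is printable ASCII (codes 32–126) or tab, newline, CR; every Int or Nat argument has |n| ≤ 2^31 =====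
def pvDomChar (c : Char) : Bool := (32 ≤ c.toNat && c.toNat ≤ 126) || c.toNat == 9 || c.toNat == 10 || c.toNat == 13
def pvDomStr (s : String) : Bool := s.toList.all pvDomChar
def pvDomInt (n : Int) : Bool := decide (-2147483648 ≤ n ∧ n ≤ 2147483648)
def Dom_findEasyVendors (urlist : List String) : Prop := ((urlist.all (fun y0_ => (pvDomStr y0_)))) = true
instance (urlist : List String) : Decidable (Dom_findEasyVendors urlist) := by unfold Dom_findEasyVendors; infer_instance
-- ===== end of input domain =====

-- B replaces A's nested vendor loop by a single precompiled regex-alternation search per row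
-- (ported as one any-of-substrings test inside a filter); objective: more idiomatic, same results.


-- ===== PORT A =====
def goodvendorsA : List String :=
  ["caymanchem", "chem-space", "indofinechemical", "matrixscientific", "mcule", "molport", "apexbt",
   "abovchem", "bldpharm", "targetmol", "trc-canada", "chemscene", "medchemexp"]

-- inner 'for v in goodvendors: if v in row: vendors.append(row); break'
def scanVendorsA (row : String) (vs : List String) (vendors : List String) : List String :=
  match vs with
  | [] => vendors
  | v :: rest => if PySem.Str.isIn v row then vendors ++ [row] else scanVendorsA row rest vendors

def findEasyVendors (urlist : List String) : List String :=
  urlist.foldl (fun vendors row => scanVendorsA row goodvendorsA vendors) []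

-- ===== PORT B =====
def goodvendorsB : List String :=
  ["caymanchem", "chem-space", "indofinechemical", "matrixscientific", "mcule", "molport", "apexbt",
   "abovchem", "bldpharm", "targetmol", "trc-canada", "chemscene", "medchemexp"]

-- regex.search(row) with the alternation of the (escaped, literal) vendors is truthy iff
-- some vendor occurs as a substring of row; this ports that library call exactly.
def regexSearchB (row : String) : Bool :=
  goodvendorsB.any (fun v => PySem.Str.isIn v row)

def findEasyVendors_alt (urlist : List String) : List String :=
  urlist.filter regexSearchB

-- ===== PRECONDITION & SPEC =====
def Spec_findEasyVendors (urlist : List String) (out : List String) : Prop := out = findEasyVendors_alt urlist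
instance (urlist : List String) (out : List String) : Decidable (Spec_findEasyVendors urlist out) := by unfold Spec_findEasyVendors; infer_instance

-- ===== CLAIM (what is proved, stated in full; the proofs are below) =====
def Claim_equal_findEasyVendors : Prop := ∀ (urlist : List String), Dom_findEasyVendors urlist → Spec_findEasyVendors urlist (findEasyVendors urlist)

-- ===== LEMMAS AND PROOFS =====

-- A's inner break-loop appends row exactly when some vendor matches.
theorem scanVendorsA_eq (row : String) (vs acc : List String) :
    scanVendorsA row vs acc = if vs.any (fun v => PySem.Str.isIn v row) then acc ++ [row] else acc := by
  induction vs with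
  | nil => simp [scanVendorsA]
  | cons v rest ih =>
    by_cases h : PySem.Str.isIn v row = true
    · rw [scanVendorsA, if_pos h, List.any_cons, h, Bool.true_or, if_pos rfl]
    · rw [scanVendorsA, if_neg h, ih, List.any_cons]
      rw [Bool.not_eq_true] at h
      rw [h, Bool.false_or]

-- ===== VERDICT (by name: the statement is the Claim_ definition above) =====
theorem findEasyVendors_spec : Claim_equal_findEasyVendors := by
  intro urlist _
  unfold Spec_findEasyVendors findEasyVendors findEasyVendors_alt
  have : ∀ acc, urlist.foldl (fun vendors row => scanVendorsA row goodvendorsA vendors) acc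
      = acc ++ urlist.filter regexSearchB := by
    intro acc
    calc urlist.foldl (fun vendors row => scanVendorsA row goodvendorsA vendors) acc
        = urlist.foldl (fun vendors row => if regexSearchB row then vendors ++ [row] else vendors) acc := by
          apply PySem.List.foldl_congr_mem; intro a x _
          rw [scanVendorsA_eq]; rfl
      _ = acc ++ urlist.filter regexSearchB := PySem.List.foldl_append_if_eq_filter regexSearchB urlist acc
  simpa using this []
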